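-- pv_equiv track=rewrite | github.com/kunztr/gpx_ski_lift_remover | gpx_ski_lift_remover.py | get_stop_start_pts
-- ===== SOURCE A (Python) =====
-- def get_stop_start_pts(pts):
--     new_pts = []
--     is_lift = False
--     for pt in pts:
--         if is_lift and pt[4] == 0:
--             is_lift = False
--             new_pts.append(pt)
--         elif not is_lift and pt[4] == 1:
--             is_lift = True
--             new_pts.append(pt)
--
--     return new_pts
-- ===== SOURCE B (Python) =====
-- def get_stop_start_pts(pts):
--     # filter to points with a 0/1 lift flag, take the first point of each
--     # run of consecutive equal flags, then drop a leading run of 0s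
--     flt = [pt for pt in pts if pt[4] in (0, 1)]
--     firsts = [pt for i, pt in enumerate(flt) if i == 0 or pt[4] != flt[i - 1][4]]
--     if firsts and firsts[0][4] == 0:
--         firsts = firsts[1:]
--     return firsts
-- ===== Notes on version B (the rewrite author's own statement) =====
-- stated objective: alternative
-- what changed: Replaces the per-element boolean lift-state machine by a filter-to-{0,1} / collapse-consecutive-runs-to-their-first-point / drop-leading-0-run decomposition.
import Mathlib
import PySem

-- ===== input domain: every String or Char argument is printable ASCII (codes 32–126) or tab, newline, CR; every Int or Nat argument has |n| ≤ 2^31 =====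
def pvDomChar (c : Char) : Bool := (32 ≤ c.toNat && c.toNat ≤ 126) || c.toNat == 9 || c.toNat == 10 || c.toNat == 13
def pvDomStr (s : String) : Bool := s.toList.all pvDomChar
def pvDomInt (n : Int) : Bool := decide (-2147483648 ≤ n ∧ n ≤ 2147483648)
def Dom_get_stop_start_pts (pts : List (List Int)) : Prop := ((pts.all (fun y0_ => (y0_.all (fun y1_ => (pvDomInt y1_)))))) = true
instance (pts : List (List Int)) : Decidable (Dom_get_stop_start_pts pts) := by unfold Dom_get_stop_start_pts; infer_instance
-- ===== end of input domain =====

-- B replaces A's boolean state machine by filter / run-firsts / drop-leading-0 (objective: alternative decomposition, same cost).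

-- pt[4]; under Pre_ every pt has length ≥ 5, so pyGet? is some and the default is never used
def pvKey (pt : List Int) : Int := (PySem.List.pyGet? pt 4).getD 0

-- ===== PORT A =====
def get_stop_start_pts (pts : List (List Int)) : List (List Int) :=
  (pts.foldl (fun (st : Bool × List (List Int)) pt =>
      if st.1 = true ∧ pvKey pt = 0 then (false, st.2 ++ [pt])
      else if st.1 = false ∧ pvKey pt = 1 then (true, st.2 ++ [pt])
      else st) (false, [])).2

-- ===== PORT B =====
-- the comprehension "i == 0 or pt[4] != flt[i-1][4]": k is the previous element's key (none at i = 0)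
def pvFirsts : Option Int → List (List Int) → List (List Int)
  | _, [] => []
  | k, pt :: rest =>
    if k = some (pvKey pt) then pvFirsts (some (pvKey pt)) rest
    else pt :: pvFirsts (some (pvKey pt)) rest

def get_stop_start_pts_alt (pts : List (List Int)) : List (List Int) :=
  let flt := pts.filter (fun pt => pvKey pt = 0 ∨ pvKey pt = 1)
  let firsts := pvFirsts none flt
  match firsts with
  | [] => []
  | p :: rest => if pvKey p = 0 then rest else p :: rest

-- ===== PRECONDITION & SPEC =====
-- A evaluates pt[4] for every point, so a point shorter than 5 raises IndexError; Pre_ excludes exactly those inputs.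
def Pre_get_stop_start_pts (pts : List (List Int)) : Prop := ∀ pt ∈ pts, 5 ≤ pt.length
instance (pts : List (List Int)) : Decidable (Pre_get_stop_start_pts pts) := by unfold Pre_get_stop_start_pts; infer_instance

def pvWitness_get_stop_start_pts : List (List Int) :=
  [[1, 2, 3, 4, 0], [1, 2, 3, 4, 1], [5, 6, 7, 8, 1], [5, 6, 7, 8, 0]]

def Spec_get_stop_start_pts (pts : List (List Int)) (out : List (List Int)) : Prop := out = get_stop_start_pts_alt pts
instance (pts : List (List Int)) (out : List (List Int)) : Decidable (Spec_get_stop_start_pts pts out) := by unfold Spec_get_stop_start_pts; infer_instance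

-- ===== CLAIM (what is proved, stated in full; the proofs are below) =====
def Claim_equal_get_stop_start_pts : Prop := ∀ (pts : List (List Int)), Dom_get_stop_start_pts pts → Pre_get_stop_start_pts pts → Spec_get_stop_start_pts pts (get_stop_start_pts pts)

-- ===== LEMMAS AND PROOFS =====

-- A's loop as structural recursion (proof helper)
def goA : Bool → List (List Int) → List (List Int)
  | _, [] => []
  | b, pt :: rest =>
    if b = true ∧ pvKey pt = 0 then pt :: goA false rest
    else if b = false ∧ pvKey pt = 1 then pt :: goA true rest
    else goA b rest

theorem foldl_goA (l : List (List Int)) (b : Bool) (acc : List (List Int)) :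
    (l.foldl (fun (st : Bool × List (List Int)) pt =>
      if st.1 = true ∧ pvKey pt = 0 then (false, st.2 ++ [pt])
      else if st.1 = false ∧ pvKey pt = 1 then (true, st.2 ++ [pt])
      else st) (b, acc)).2 = acc ++ goA b l := by
  induction l generalizing b acc with
  | nil => simp [goA]
  | cons pt rest ih =>
    simp only [List.foldl_cons, goA]
    by_cases h0 : b = true ∧ pvKey pt = 0
    · simp [h0, ih]
    · by_cases h1 : b = false ∧ pvKey pt = 1
      · simp [h0, h1, ih]
      · simp [h0, h1, ih]

theorem goA_eq_firsts (l : List (List Int)) (b : Bool) :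
    goA b l = pvFirsts (some (if b then 1 else 0))
      (l.filter (fun pt => pvKey pt = 0 ∨ pvKey pt = 1)) := by
  induction l generalizing b with
  | nil => simp [goA, pvFirsts]
  | cons pt rest ih =>
    by_cases hf : pvKey pt = 0 ∨ pvKey pt = 1
    · cases b with
      | false =>
        rcases hf with h | h
        · simp [goA, pvFirsts, h, List.filter_cons, ih]
        · simp [goA, pvFirsts, h, List.filter_cons, ih]
      | true =>
        rcases hf with h | h
        · simp [goA, pvFirsts, h, List.filter_cons, ih]
        · simp [goA, pvFirsts, h, List.filter_cons, ih]
    · push_neg at hf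
      have hb0 : ¬ (b = true ∧ pvKey pt = 0) := fun h => hf.1 h.2
      have hb1 : ¬ (b = false ∧ pvKey pt = 1) := fun h => hf.2 h.2
      simp [goA, hb0, hb1, List.filter_cons, hf.1, hf.2, ih]

theorem trim_firsts (l : List (List Int)) :
    (match pvFirsts none l with
     | [] => ([] : List (List Int))
     | p :: rest => if pvKey p = 0 then rest else p :: rest) =
    pvFirsts (some 0) l := by
  cases l with
  | nil => simp [pvFirsts]
  | cons p rest =>
    by_cases h : pvKey p = 0
    · simp [pvFirsts, h]
    · simp [pvFirsts, h, Ne.symm h]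

-- ===== VERDICT (by name: the statement is the Claim_ definition above) =====
theorem get_stop_start_pts_spec : Claim_equal_get_stop_start_pts := by
  intro pts _ _
  show get_stop_start_pts pts = get_stop_start_pts_alt pts
  have h1 := foldl_goA pts false []
  have h2 := goA_eq_firsts pts false
  have h3 := trim_firsts (pts.filter (fun pt => pvKey pt = 0 ∨ pvKey pt = 1))
  simp only [get_stop_start_pts, get_stop_start_pts_alt, h1, List.nil_append, h2]
  simpa using h3.symm
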